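-- pv_equiv track=rewrite | github.com/maxmiranda/Project-Euler | problem54/problem54.py | count
-- ===== SOURCE A (Python) =====
-- def count(values):
--     # works both for counting pairs and counting if there is a flush or not
--     vals = []
--     counts = []
--     for card in range(5):
--         count = 1
--         if values[card] not in vals:
--             for i in range(1,5):
--                 if i+card < 5 and values[card] == values[i+card]:
--                     count +=1
--                     vals.append(values[card])
--             counts.append([count, values[card]])
--     real_counts = [count for count in counts if count[0] > 1]
--     if len(real_counts)>=1:
--         return real_counts + [[0,0]] +[[0,0]]
--     else:
--         return [[0,0],[0,0]]
-- ===== SOURCE B (Python) =====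
-- def count(values):
--     # One counting pass over the 5 cards: frequency dict + first-occurrence order,
--     # then emit [multiplicity, value] for repeated values, padded with two [0,0].
--     hand = [values[i] for i in range(5)]
--     freq = {}
--     for v in hand:
--         freq[v] = freq.get(v, 0) + 1
--     order = []
--     for v in hand:
--         if v not in order:
--             order.append(v)
--     return [[freq[v], v] for v in order if freq[v] > 1] + [[0, 0], [0, 0]]
-- ===== Notes on version B (the rewrite author's own statement) =====
-- stated objective: simpler
-- what changed: Replaces A's nested pairwise index scan with a 'seen' list by a single counting pass (frequency dict + first-occurrence order) followed by one comprehension; the redundant non-empty/empty branch collapses into an unconditional pad.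
import Mathlib
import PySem

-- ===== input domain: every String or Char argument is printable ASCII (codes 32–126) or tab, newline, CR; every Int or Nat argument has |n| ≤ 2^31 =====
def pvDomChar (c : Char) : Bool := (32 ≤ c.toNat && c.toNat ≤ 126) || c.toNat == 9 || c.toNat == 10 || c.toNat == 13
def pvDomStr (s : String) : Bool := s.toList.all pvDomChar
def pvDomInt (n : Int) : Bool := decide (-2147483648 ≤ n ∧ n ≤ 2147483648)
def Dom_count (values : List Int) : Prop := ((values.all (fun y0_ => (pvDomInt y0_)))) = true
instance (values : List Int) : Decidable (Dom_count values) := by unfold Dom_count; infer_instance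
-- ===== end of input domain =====

-- B is simpler: one counting pass (frequency dict + first-occurrence order) replaces A's nested pairwise scan with a 'seen' list.

-- ===== PORT A =====
-- body of A's outer loop (named helper; 'vals', 'counts' are the loop's two variables)
def stepA (values : List Int) (st : List Int × List (List Int)) (card : Int) :
    List Int × List (List Int) :=
  if PySem.List.pyGetD values card 0 ∈ st.1 then st
  else
    let inner := (PySem.List.pyRange 1 5 1).foldl (fun (q : Int × List Int) i =>
      if i + card < 5 ∧ PySem.List.pyGetD values card 0 = PySem.List.pyGetD values (i + card) 0 then
        (q.1 + 1, q.2 ++ [PySem.List.pyGetD values card 0])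
      else q) (1, st.1)
    (inner.2, st.2 ++ [[inner.1, PySem.List.pyGetD values card 0]])

def count (values : List Int) : List (List Int) :=
  let st := (PySem.List.pyRange 0 5 1).foldl (stepA values) ([], [])
  let real_counts := st.2.filter (fun c => PySem.List.pyGetD c 0 0 > 1)
  if real_counts.length ≥ 1 then real_counts ++ [[0, 0]] ++ [[0, 0]]
  else [[0, 0], [0, 0]]

-- ===== PORT B =====
def count_alt (values : List Int) : List (List Int) :=
  let hand := (PySem.List.pyRange 0 5 1).map (fun i => PySem.List.pyGetD values i 0)
  let freq := hand.foldl (fun d v => d.insert v (d.getD v 0 + 1)) PySem.Dict.empty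
  let order := hand.foldl (fun acc v => if v ∈ acc then acc else acc ++ [v]) ([] : List Int)
  (order.filter (fun v => freq.getD v 0 > 1)).map (fun v => [freq.getD v 0, v]) ++ [[0, 0], [0, 0]]

-- ===== PRECONDITION & SPEC =====
-- Pre_ excludes exactly the lists of fewer than 5 cards, on which the Python A raises IndexError (B raises there too).
def Pre_count (values : List Int) : Prop := 5 ≤ values.length
instance (values : List Int) : Decidable (Pre_count values) := by unfold Pre_count; infer_instance
def pvWitness_count : List Int := [3, 3, 7, 9, 7, 1]

def Spec_count (values : List Int) (out : List (List Int)) : Prop := out = count_alt values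
instance (values : List Int) (out : List (List Int)) : Decidable (Spec_count values out) := by unfold Spec_count; infer_instance

-- ===== CLAIM (what is proved, stated in full; the proofs are below) =====
def Claim_equal_count : Prop := ∀ (values : List Int), Dom_count values → Pre_count values → Spec_count values (count values)

-- ===== LEMMAS AND PROOFS =====

-- the common reduced form of both programs on a hand H (the first five values)
def specOut (H : List Int) : List (List Int) :=
  ((PySem.List.dedup H).filter (fun x => (H.count x : Int) > 1)).map
    (fun x => [(H.count x : Int), x]) ++ [[0, 0], [0, 0]]

-- A's inner loop counts the positions satisfying p and appends that many copies of v
theorem inner_fold (p : Int → Prop) [DecidablePred p] (v : Int) (l : List Int) :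
    ∀ (n : Int) (vals : List Int),
      l.foldl (fun (q : Int × List Int) i => if p i then (q.1 + 1, q.2 ++ [v]) else q) (n, vals)
        = (n + (l.countP (fun i => decide (p i)) : Int),
           vals ++ List.replicate (l.countP (fun i => decide (p i))) v) := by
  induction l with
  | nil => intro n vals; simp
  | cons x xs ih =>
      intro n vals
      by_cases hx : p x
      · simp only [List.foldl_cons, ih, List.countP_cons, hx, decide_true,
          if_true, List.replicate_succ, Prod.mk.injEq]
        constructor
        · push_cast; ring
        · simp
      · simp [List.foldl_cons, hx, ih]

-- a value repeated before position k occurs more than once in H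
theorem two_le_count (H : List Int) (k : Nat) (hk : k < H.length)
    (h : H.getD k 0 ∈ H.take k) : 1 < H.count (H.getD k 0) := by
  have hg : H.getD k 0 = H[k] := List.getD_eq_getElem H 0 hk
  have h1 : H.getD k 0 ∈ H.drop k := by
    rw [hg, List.drop_eq_getElem_cons hk]; exact List.mem_cons_self
  have c1 : 0 < (H.take k).count (H.getD k 0) := List.count_pos_iff.mpr h
  have c2 : 0 < (H.drop k).count (H.getD k 0) := List.count_pos_iff.mpr h1
  have hsplit : H.count (H.getD k 0)
      = (H.take k).count (H.getD k 0) + (H.drop k).count (H.getD k 0) := by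
    rw [← List.count_append, List.take_append_drop]
  omega

-- if H[k] is a first occurrence, its total count is 1 + its count after position k
theorem count_eq_succ (H : List Int) (k : Nat) (hk : k < H.length)
    (h : H.getD k 0 ∉ H.take k) :
    H.count (H.getD k 0) = 1 + (H.drop (k + 1)).count (H.getD k 0) := by
  have hg : H.getD k 0 = H[k] := List.getD_eq_getElem H 0 hk
  have hz : (H.take k).count (H.getD k 0) = 0 := List.count_eq_zero.mpr h
  have hsplit : H.count (H.getD k 0)
      = (H.take k).count (H.getD k 0) + (H.drop k).count (H.getD k 0) := by
    rw [← List.count_append, List.take_append_drop]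
  have hdk : (H.drop k).count (H.getD k 0)
      = (H.drop (k + 1)).count (H.getD k 0) + 1 := by
    rw [List.drop_eq_getElem_cons hk, ← hg, List.count_cons_self]
  omega

-- first-occurrence dedup of a one-longer prefix
theorem dedup_take_succ (H : List Int) (k : Nat) (hk : k < H.length) :
    PySem.List.dedup (H.take (k + 1))
      = if H.getD k 0 ∈ H.take k then PySem.List.dedup (H.take k)
        else PySem.List.dedup (H.take k) ++ [H.getD k 0] := by
  have hg : H[k]?.toList = [H.getD k 0] := by
    rw [List.getElem?_eq_getElem hk, List.getD_eq_getElem H 0 hk]; rfl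
  rw [List.take_add_one, hg, PySem.List.dedup_eq_ofList, PySem.Set.ofList_eq_foldl,
    List.foldl_append, ← PySem.Set.ofList_eq_foldl, ← PySem.List.dedup_eq_ofList]
  by_cases hm : H.getD k 0 ∈ H.take k <;>
    simp [PySem.Set.add, PySem.Set.contains]

-- A's inner count at card k equals the count of H[k] after position k (H = first five values)
set_option maxHeartbeats 1000000 in
theorem inner_count (a b c d e : Int) (rest : List Int) (k : Nat) (hk : k < 5) :
    ((PySem.List.pyRange 1 5 1).countP
        (fun i => decide (i + (k : Int) < 5 ∧
          ([a, b, c, d, e] : List Int).getD k 0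
            = PySem.List.pyGetD (a :: b :: c :: d :: e :: rest) (i + (k : Int)) 0)))
      = (([a, b, c, d, e] : List Int).drop (k + 1)).count
          (([a, b, c, d, e] : List Int).getD k 0) := by
  have p1 : PySem.List.pyGetD (a :: b :: c :: d :: e :: rest) 1 0 = b := by simp [pysem]
  have p2 : PySem.List.pyGetD (a :: b :: c :: d :: e :: rest) 2 0 = c := by simp [pysem]
  have p3 : PySem.List.pyGetD (a :: b :: c :: d :: e :: rest) 3 0 = d := by simp [pysem]
  have p4 : PySem.List.pyGetD (a :: b :: c :: d :: e :: rest) 4 0 = e := by simp [pysem]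
  rw [show PySem.List.pyRange 1 5 1 = ([1, 2, 3, 4] : List Int) from by decide]
  obtain rfl | rfl | rfl | rfl | rfl : k = 0 ∨ k = 1 ∨ k = 2 ∨ k = 3 ∨ k = 4 := by omega
  all_goals norm_num [List.countP_cons, List.count_cons, p1, p2, p3, p4]
  all_goals simp [eq_comm]

theorem vk_eq (a b c d e : Int) (rest : List Int) (k : Nat) (hk : k < 5) :
    PySem.List.pyGetD (a :: b :: c :: d :: e :: rest) (k : Int) 0
      = ([a, b, c, d, e] : List Int).getD k 0 := by
  rw [PySem.List.pyGetD_natCast]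
  exact List.getD_append ([a, b, c, d, e]) rest 0 k (by simpa using hk)

theorem mem_take_succ (H : List Int) (k : Nat) (hk : k < H.length) (x : Int) :
    x ∈ H.take (k + 1) ↔ x ∈ H.take k ∨ x = H.getD k 0 := by
  rw [List.take_add_one, List.getElem?_eq_getElem hk, List.getD_eq_getElem H 0 hk,
    Option.toList_some, List.mem_append, List.mem_singleton]

-- stepA on an explicit pair (definitional unfolding)
theorem stepA_eq (values : List Int) (vals : List Int) (counts : List (List Int)) (card : Int) :
    stepA values (vals, counts) card
      = if PySem.List.pyGetD values card 0 ∈ vals then (vals, counts)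
        else
          (((PySem.List.pyRange 1 5 1).foldl (fun (q : Int × List Int) i =>
              if i + card < 5 ∧ PySem.List.pyGetD values card 0
                  = PySem.List.pyGetD values (i + card) 0 then
                (q.1 + 1, q.2 ++ [PySem.List.pyGetD values card 0])
              else q) (1, vals)).2,
           counts ++ [[((PySem.List.pyRange 1 5 1).foldl (fun (q : Int × List Int) i =>
              if i + card < 5 ∧ PySem.List.pyGetD values card 0
                  = PySem.List.pyGetD values (i + card) 0 then
                (q.1 + 1, q.2 ++ [PySem.List.pyGetD values card 0])
              else q) (1, vals)).1, PySem.List.pyGetD values card 0]]) := rfl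

-- outer-loop invariant for A
theorem outer_inv (a b c d e : Int) (rest : List Int) :
    ∀ (n k : Nat), k + n = 5 →
    ∀ (vals : List Int) (counts : List (List Int)),
      (∀ x, x ∈ vals ↔ x ∈ ([a, b, c, d, e] : List Int).take k ∧
          1 < ([a, b, c, d, e] : List Int).count x) →
      counts = (PySem.List.dedup (([a, b, c, d, e] : List Int).take k)).map
          (fun x => [(([a, b, c, d, e] : List Int).count x : Int), x]) →
      ((PySem.List.pyRange (k : Int) 5 1).foldl (stepA (a :: b :: c :: d :: e :: rest))
          (vals, counts)).2
        = (PySem.List.dedup ([a, b, c, d, e] : List Int)).map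
            (fun x => [(([a, b, c, d, e] : List Int).count x : Int), x]) := by
  intro n
  induction n with
  | zero =>
      intro k hk vals counts hv hc
      have hk5 : k = 5 := by omega
      subst hk5
      rw [PySem.List.pyRange_one_eq_nil (by norm_num)]
      simpa using hc
  | succ n ih =>
      intro k hk vals counts hv hc
      have hk5 : k < 5 := by omega
      have hkl : k < ([a, b, c, d, e] : List Int).length := by simpa using hk5
      rw [PySem.List.pyRange_one_cons (by exact_mod_cast hk5), List.foldl_cons,
        show (k : Int) + 1 = ((k + 1 : Nat) : Int) by push_cast; ring]
      by_cases hmem : ([a, b, c, d, e] : List Int).getD k 0 ∈ vals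
      · have hstep : stepA (a :: b :: c :: d :: e :: rest) (vals, counts) (k : Int)
            = (vals, counts) := by
          rw [stepA_eq, vk_eq a b c d e rest k hk5, if_pos hmem]
        rw [hstep]
        have htk : ([a, b, c, d, e] : List Int).getD k 0 ∈ ([a, b, c, d, e] : List Int).take k :=
          ((hv _).1 hmem).1
        refine ih (k + 1) (by omega) vals counts ?_ ?_
        · intro x
          rw [mem_take_succ _ _ hkl, hv x]
          constructor
          · rintro ⟨h1, h2⟩; exact ⟨Or.inl h1, h2⟩
          · rintro ⟨h1 | rfl, h2⟩
            · exact ⟨h1, h2⟩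
            · exact ⟨htk, h2⟩
        · rw [hc, dedup_take_succ _ _ hkl, if_pos htk]
      · have htk : ([a, b, c, d, e] : List Int).getD k 0 ∉ ([a, b, c, d, e] : List Int).take k := by
          intro h
          exact hmem ((hv _).2 ⟨h, two_le_count _ k hkl h⟩)
        have hcnt := count_eq_succ ([a, b, c, d, e] : List Int) k hkl htk
        have hstep : stepA (a :: b :: c :: d :: e :: rest) (vals, counts) (k : Int)
            = (vals ++ List.replicate
                  ((([a, b, c, d, e] : List Int).drop (k + 1)).count
                    (([a, b, c, d, e] : List Int).getD k 0))
                  (([a, b, c, d, e] : List Int).getD k 0),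
               counts ++ [[1 + (((([a, b, c, d, e] : List Int).drop (k + 1)).count
                    (([a, b, c, d, e] : List Int).getD k 0) : Nat) : Int),
                  ([a, b, c, d, e] : List Int).getD k 0]]) := by
          rw [stepA_eq, vk_eq a b c d e rest k hk5, if_neg hmem]
          rw [inner_fold
            (fun i => i + (k : Int) < 5 ∧ ([a, b, c, d, e] : List Int).getD k 0
              = PySem.List.pyGetD (a :: b :: c :: d :: e :: rest) (i + (k : Int)) 0)
            (([a, b, c, d, e] : List Int).getD k 0) _ 1 vals]
          rw [inner_count a b c d e rest k hk5]
        rw [hstep]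
        refine ih (k + 1) (by omega) _ _ ?_ ?_
        · intro x
          rw [List.mem_append, List.mem_replicate, hv x, mem_take_succ _ _ hkl]
          constructor
          · rintro (⟨h1, h2⟩ | ⟨hm0, rfl⟩)
            · exact ⟨Or.inl h1, h2⟩
            · exact ⟨Or.inr rfl, by omega⟩
          · rintro ⟨h1 | rfl, h2⟩
            · exact Or.inl ⟨h1, h2⟩
            · exact Or.inr ⟨by omega, rfl⟩
        · rw [hc, dedup_take_succ _ _ hkl, if_neg htk, List.map_append]
          simp only [List.map_cons, List.map_nil, List.append_cancel_left_eq]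
          rw [hcnt]
          push_cast
          ring_nf

theorem A_eq (a b c d e : Int) (rest : List Int) :
    count (a :: b :: c :: d :: e :: rest) = specOut [a, b, c, d, e] := by
  have h0 := outer_inv a b c d e rest 5 0 rfl [] [] (by simp) (by simp)
  norm_num at h0
  simp only [count]
  rw [h0, List.filter_map]
  have hpred : ((fun c => decide (PySem.List.pyGetD c 0 0 > 1)) ∘
      (fun x => [((([a, b, c, d, e] : List Int).count x : Nat) : Int), x]))
      = fun x => decide (((([a, b, c, d, e] : List Int).count x : Nat) : Int) > 1) := by
    funext x
    simp [PySem.List.pyGetD_zero_cons]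
  rw [hpred]
  unfold specOut
  simp only [PySem.List.dedup_eq_ofList]
  split_ifs with hlen
  · simp [List.append_assoc]
  · have hnil : List.filter
        (fun x => decide (((([a, b, c, d, e] : List Int).count x : Nat) : Int) > 1))
        (PySem.Set.ofList ([a, b, c, d, e] : List Int)) = [] := by
      by_contra hne
      refine hlen ?_
      rw [List.length_map]
      exact Nat.one_le_iff_ne_zero.mpr (by simpa [← List.length_eq_zero_iff] using hne)
    rw [hnil]
    simp

theorem B_eq (a b c d e : Int) (rest : List Int) :
    count_alt (a :: b :: c :: d :: e :: rest) = specOut [a, b, c, d, e] := by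
  have hhand : (PySem.List.pyRange 0 5 1).map
      (fun i => PySem.List.pyGetD (a :: b :: c :: d :: e :: rest) i 0) = [a, b, c, d, e] := by
    rw [show PySem.List.pyRange 0 5 1 = [0, 1, 2, 3, 4] from by decide]
    simp [pysem]
  have horder : ([a, b, c, d, e] : List Int).foldl
      (fun acc v => if v ∈ acc then acc else acc ++ [v]) ([] : List Int)
      = PySem.List.dedup [a, b, c, d, e] := by
    rw [PySem.List.dedup_eq_ofList, PySem.Set.ofList_eq_foldl]
    refine PySem.List.foldl_congr_mem _ _ _ _ ?_
    intro acc x hx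
    by_cases hmm : x ∈ acc <;> simp [PySem.Set.add, PySem.Set.contains, hmm]
  simp only [count_alt, hhand, PySem.Dict.foldl_insert_getD_add_one_eq_counter, horder]
  unfold specOut
  simp [PySem.Dict.getD_counter]

-- ===== VERDICT (by name: the statement is the Claim_ definition above) =====
theorem count_spec : Claim_equal_count := by
  intro values _ hpre
  unfold Spec_count
  obtain ⟨a, b, c, d, e, rest, rfl⟩ : ∃ a b c d e rest,
      values = a :: b :: c :: d :: e :: rest := by
    match values, hpre with
    | a :: b :: c :: d :: e :: rest, _ => exact ⟨a, b, c, d, e, rest, rfl⟩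
  rw [A_eq, B_eq]
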